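-- pv_equiv track=rewrite | github.com/Avagenzo/levenshtein-recipe | recipe.py | remove_duplicate_pairs
-- ===== SOURCE A (Python) =====
-- from collections import defaultdict
--
-- def remove_duplicate_pairs(recipe1, recipe2):
--     # Create defaultdicts to track occurrences of each hash in both recipes
--     recipe1_hashes = defaultdict(list)
--     recipe2_hashes = defaultdict(list)
--
--     # Fill the hash maps with the indices of matching ingredients
--     for i, item in enumerate(recipe1):
--         recipe1_hashes[item[3]].append(i)
--
--     for i, item in enumerate(recipe2):
--         recipe2_hashes[item[3]].append(i)
--
--     # Process recipe1 and remove pairs found in recipe2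
--     to_remove_recipe1 = set()
--     to_remove_recipe2 = set()
--
--     # Remove matching ingredients from recipe1 and recipe2
--     for hash_value in list(recipe1_hashes):
--         if hash_value in recipe2_hashes:
--             # Remove one occurrence from both recipes
--             if recipe1_hashes[hash_value] and recipe2_hashes[hash_value]:
--                 to_remove_recipe1.add(recipe1_hashes[hash_value].pop(0))  # Remove one from recipe1
--                 to_remove_recipe2.add(recipe2_hashes[hash_value].pop(0))  # Remove one from recipe2
--
--     # Remove the marked items from both recipes
--     recipe1 = [item for i, item in enumerate(recipe1) if i not in to_remove_recipe1]
--     recipe2 = [item for i, item in enumerate(recipe2) if i not in to_remove_recipe2]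
--
--     return recipe1, recipe2
-- ===== SOURCE B (Python) =====
-- def remove_duplicate_pairs(recipe1, recipe2):
--     # hashes present in both recipes (item[3] is the ingredient hash)
--     shared = {item[3] for item in recipe1} & {item[3] for item in recipe2}
--
--     def keep_all_but_first_shared(recipe):
--         pending = set(shared)
--         kept = []
--         for item in recipe:
--             h = item[3]
--             if h in pending:
--                 pending.discard(h)  # drop first occurrence of a shared hash
--             else:
--                 kept.append(item)
--         return kept
--
--     return keep_all_but_first_shared(recipe1), keep_all_but_first_shared(recipe2)
-- ===== Notes on version B (the rewrite author's own statement) =====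
-- stated objective: simpler
-- what changed: Instead of building per-hash index lists, popping one index per shared hash into removal sets and filtering by index, B computes the shared-hash set once and filters each recipe in a single pass with a mutable pending set that skips the first occurrence of each shared hash.
import Mathlib
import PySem

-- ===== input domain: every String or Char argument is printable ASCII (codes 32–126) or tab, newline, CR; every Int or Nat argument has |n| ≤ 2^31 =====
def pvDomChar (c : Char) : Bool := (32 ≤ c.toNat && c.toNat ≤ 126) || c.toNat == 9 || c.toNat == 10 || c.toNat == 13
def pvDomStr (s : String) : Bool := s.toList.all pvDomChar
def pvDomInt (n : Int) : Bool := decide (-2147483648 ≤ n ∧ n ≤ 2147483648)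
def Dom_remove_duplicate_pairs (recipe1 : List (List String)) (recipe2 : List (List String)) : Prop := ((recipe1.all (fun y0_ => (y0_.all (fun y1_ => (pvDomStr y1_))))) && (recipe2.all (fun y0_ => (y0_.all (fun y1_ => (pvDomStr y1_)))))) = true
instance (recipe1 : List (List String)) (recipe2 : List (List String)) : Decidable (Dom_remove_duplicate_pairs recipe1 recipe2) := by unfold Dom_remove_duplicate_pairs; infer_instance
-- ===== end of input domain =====

-- B replaces A's per-hash index lists + pop + index-set filtering with one shared-hash set and a
-- single-pass pending-set filter per recipe (objective: simpler). Equivalence of RETURN values.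

-- ===== PORT A =====
-- item[3] (Pre_ guarantees every item has length ≥ 4, so the default never fires)
def rdpKey (item : List String) : String := PySem.List.pyGetD item 3 ""

-- body of A's 'for hash_value in list(recipe1_hashes)' loop, state (to_remove_recipe1, to_remove_recipe2, recipe1_hashes, recipe2_hashes)
def rdpStep (st : PySem.Set Int × PySem.Set Int × PySem.Dict String (List Int) × PySem.Dict String (List Int))
    (h : String) : PySem.Set Int × PySem.Set Int × PySem.Dict String (List Int) × PySem.Dict String (List Int) :=
  if st.2.2.2.contains h then
    match st.2.2.1.getD h [], st.2.2.2.getD h [] with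
    | a :: as, b :: bs =>
        (PySem.Set.add st.1 a, PySem.Set.add st.2.1 b, st.2.2.1.insert h as, st.2.2.2.insert h bs)
    | _, _ => st
  else st

def remove_duplicate_pairs (recipe1 : List (List String)) (recipe2 : List (List String)) : List (List String) × List (List String) :=
  -- fill the hash maps with the indices of matching ingredients
  let h1 : PySem.Dict String (List Int) :=
    (PySem.List.enumerate recipe1 0).foldl (fun d p => d.modify (rdpKey p.2) [] (fun l => l ++ [p.1])) PySem.Dict.empty
  let h2 : PySem.Dict String (List Int) :=
    (PySem.List.enumerate recipe2 0).foldl (fun d p => d.modify (rdpKey p.2) [] (fun l => l ++ [p.1])) PySem.Dict.empty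
  -- remove one occurrence per shared hash
  let st := h1.keys.foldl rdpStep (PySem.Set.empty, PySem.Set.empty, h1, h2)
  -- remove the marked items from both recipes
  (((PySem.List.enumerate recipe1 0).filter (fun p => !(PySem.Set.contains st.1 p.1))).map (·.2),
   ((PySem.List.enumerate recipe2 0).filter (fun p => !(PySem.Set.contains st.2.1 p.1))).map (·.2))

-- ===== PORT B =====
-- one pass: skip the first occurrence of each pending shared hash, keep everything else
def rdpFilterShared (shared : PySem.Set String) (recipe : List (List String)) : List (List String) :=
  (recipe.foldl
    (fun (st : PySem.Set String × List (List String)) item =>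
      let h := PySem.List.pyGetD item 3 ""
      if PySem.Set.contains st.1 h then (PySem.Set.discard st.1 h, st.2)
      else (st.1, st.2 ++ [item]))
    (shared, [])).2

def remove_duplicate_pairs_alt (recipe1 : List (List String)) (recipe2 : List (List String)) : List (List String) × List (List String) :=
  let shared : PySem.Set String :=
    PySem.Set.inter (PySem.Set.ofList (recipe1.map (fun item => PySem.List.pyGetD item 3 "")))
                    (PySem.Set.ofList (recipe2.map (fun item => PySem.List.pyGetD item 3 "")))
  (rdpFilterShared shared recipe1, rdpFilterShared shared recipe2)

-- ===== PRECONDITION & SPEC =====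
-- Pre_ excludes exactly the inputs where Python A raises IndexError on item[3]: some item shorter than 4.
def Pre_remove_duplicate_pairs (recipe1 : List (List String)) (recipe2 : List (List String)) : Prop :=
  (∀ item ∈ recipe1, 4 ≤ item.length) ∧ (∀ item ∈ recipe2, 4 ≤ item.length)
instance (recipe1 : List (List String)) (recipe2 : List (List String)) : Decidable (Pre_remove_duplicate_pairs recipe1 recipe2) := by unfold Pre_remove_duplicate_pairs; infer_instance

def pvWitness_remove_duplicate_pairs : List (List String) × List (List String) :=
  ([["2", "cups", "flour", "h1"], ["1", "tsp", "salt", "h2"]], [["3", "cups", "flour", "h1"]])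

def Spec_remove_duplicate_pairs (recipe1 : List (List String)) (recipe2 : List (List String)) (out : List (List String) × List (List String)) : Prop := out = remove_duplicate_pairs_alt recipe1 recipe2
instance (recipe1 : List (List String)) (recipe2 : List (List String)) (out : List (List String) × List (List String)) : Decidable (Spec_remove_duplicate_pairs recipe1 recipe2 out) := by unfold Spec_remove_duplicate_pairs; infer_instance

-- ===== CLAIM (what is proved, stated in full; the proofs are below) =====
def Claim_equal_remove_duplicate_pairs : Prop := ∀ (recipe1 : List (List String)) (recipe2 : List (List String)), Dom_remove_duplicate_pairs recipe1 recipe2 → Pre_remove_duplicate_pairs recipe1 recipe2 → Spec_remove_duplicate_pairs recipe1 recipe2 (remove_duplicate_pairs recipe1 recipe2)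

-- ===== LEMMAS AND PROOFS =====

-- index (as produced by enumerate starting at n) of the first item of r whose key is h
def rdpHeadIdx (r : List (List String)) (n : Int) (h : String) : Option Int :=
  match r with
  | [] => none
  | it :: r' => if rdpKey it = h then some n else rdpHeadIdx r' (n + 1) h


-- head of the per-hash index list = index of the first occurrence
theorem rdpHeadIdx_filter (r : List (List String)) (n : Int) (h : String) :
    ((((PySem.List.enumerate r n).filter (fun p => rdpKey p.2 == h)).map (·.1)).head?) = rdpHeadIdx r n h := by
  induction r generalizing n with
  | nil => simp [rdpHeadIdx, PySem.List.enumerate_nil]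
  | cons it r' ih =>
    rw [PySem.List.enumerate_cons]
    by_cases hc : rdpKey it = h
    · simp [rdpHeadIdx, hc]
    · simp [rdpHeadIdx, hc, ih]

theorem rdpHeadIdx_isSome (r : List (List String)) (n : Int) (h : String) :
    (rdpHeadIdx r n h).isSome = true ↔ h ∈ r.map rdpKey := by
  induction r generalizing n with
  | nil => simp [rdpHeadIdx]
  | cons it r' ih =>
    by_cases hc : rdpKey it = h
    · simp [rdpHeadIdx, hc]
    · simp [rdpHeadIdx, hc, ih, Ne.symm hc]

theorem rdpHeadIdx_eq_some (r : List (List String)) (n : Int) (h : String) (i : Int)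
    (he : rdpHeadIdx r n h = some i) :
    ∃ (j : Nat) (hj : j < r.length), i = n + j ∧ rdpKey r[j] = h := by
  induction r generalizing n with
  | nil => simp [rdpHeadIdx] at he
  | cons it r' ih =>
    by_cases hc : rdpKey it = h
    · simp [rdpHeadIdx, hc] at he
      exact ⟨0, by simp, by omega, by simpa using hc⟩
    · simp [rdpHeadIdx, hc] at he
      obtain ⟨j, hj, hi, hk⟩ := ih (n + 1) he
      exact ⟨j + 1, by simpa using hj, by push_cast; omega, by simpa using hk⟩



-- the dict of index lists: value at h, and its keys
def rdpBuild (r : List (List String)) : PySem.Dict String (List Int) :=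
  (PySem.List.enumerate r 0).foldl (fun d p => d.modify (rdpKey p.2) [] (fun l => l ++ [p.1])) PySem.Dict.empty

theorem rdpBuild_getD (r : List (List String)) (h : String) :
    (rdpBuild r).getD h [] = ((PySem.List.enumerate r 0).filter (fun p => rdpKey p.2 == h)).map (·.1) := by
  have hm : (PySem.List.enumerate r 0).foldl (fun d p => d.modify (rdpKey p.2) [] (fun l => l ++ [p.1])) PySem.Dict.empty
      = ((PySem.List.enumerate r 0).map (fun p => ((rdpKey p.2 : String), (p.1 : Int)))).foldl
          (fun d q => d.modify q.1 [] (fun l => l ++ [q.2])) PySem.Dict.empty := by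
    rw [List.foldl_map]
  rw [rdpBuild, hm, PySem.Dict.getD_foldl_modify_append]
  simp [List.filter_map, List.map_map, Function.comp_def]

theorem rdpBuild_keys_mem (r : List (List String)) (h : String) :
    h ∈ (rdpBuild r).keys ↔ h ∈ r.map rdpKey := by
  have hk := PySem.Dict.keys_foldl_modify_key (PySem.List.enumerate r 0)
      (fun p => rdpKey p.2) ([] : List Int) (fun _ p => (fun l => l ++ [p.1])) PySem.Dict.empty
  rw [rdpBuild, hk]
  have : ((PySem.List.enumerate r 0).map (fun p => rdpKey p.2)) = r.map rdpKey := by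
    have := PySem.List.map_snd_enumerate r (0 : Int)
    calc ((PySem.List.enumerate r 0).map (fun p => rdpKey p.2))
        = (((PySem.List.enumerate r 0).map (·.2)).map rdpKey) := by rw [List.map_map]; rfl
      _ = r.map rdpKey := by rw [this]
  rw [PySem.Dict.keys_empty]
  rw [PySem.Set.update, this, ← PySem.Set.ofList_eq_foldl]
  simp [PySem.Set.mem_ofList]

theorem rdpBuild_keys_nodup (r : List (List String)) : (rdpBuild r).keys.Nodup := by
  exact PySem.Dict.nodup_keys_foldl_modify_key (PySem.List.enumerate r 0)
      (fun p => rdpKey p.2) ([] : List Int) (fun _ p => (fun l => l ++ [p.1])) PySem.Dict.empty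
      (by simp)


-- membership in the removal sets after A's key loop
theorem rdpLoop_mem1 (ks : List String) (tr1 tr2 : PySem.Set Int)
    (d1 d2 : PySem.Dict String (List Int)) (hnd : ks.Nodup) (i : Int) :
    i ∈ (ks.foldl rdpStep (tr1, tr2, d1, d2)).1 ↔
      i ∈ tr1 ∨ ∃ h ∈ ks, d2.contains h = true ∧ (d1.getD h []).head? = some i ∧ d2.getD h [] ≠ [] := by
  induction ks generalizing tr1 tr2 d1 d2 with
  | nil => simp
  | cons h ks ih =>
    have hnotin : h ∉ ks := (List.nodup_cons.mp hnd).1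
    have hnd' : ks.Nodup := (List.nodup_cons.mp hnd).2
    rw [List.foldl_cons]
    by_cases hc : d2.contains h = true
    · rcases hl1 : d1.getD h [] with _ | ⟨a, as⟩
      · have hstep : rdpStep (tr1, tr2, d1, d2) h = (tr1, tr2, d1, d2) := by
          simp [rdpStep, hc, hl1]
        rw [hstep, ih _ _ _ _ hnd']
        constructor
        · rintro (h1 | ⟨h', hm, hp⟩)
          · exact Or.inl h1
          · exact Or.inr ⟨h', List.mem_cons_of_mem _ hm, hp⟩
        · rintro (h1 | ⟨h', hm, hc', hp, hne⟩)
          · exact Or.inl h1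
          · rcases List.mem_cons.mp hm with rfl | hm'
            · rw [hl1] at hp; simp at hp
            · exact Or.inr ⟨h', hm', hc', hp, hne⟩
      · rcases hl2 : d2.getD h [] with _ | ⟨b, bs⟩
        · have hstep : rdpStep (tr1, tr2, d1, d2) h = (tr1, tr2, d1, d2) := by
            simp [rdpStep, hc, hl1, hl2]
          rw [hstep, ih _ _ _ _ hnd']
          constructor
          · rintro (h1 | ⟨h', hm, hp⟩)
            · exact Or.inl h1
            · exact Or.inr ⟨h', List.mem_cons_of_mem _ hm, hp⟩
          · rintro (h1 | ⟨h', hm, hc', hp, hne⟩)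
            · exact Or.inl h1
            · rcases List.mem_cons.mp hm with rfl | hm'
              · rw [hl2] at hne; simp at hne
              · exact Or.inr ⟨h', hm', hc', hp, hne⟩
        · have hstep : rdpStep (tr1, tr2, d1, d2) h =
              (PySem.Set.add tr1 a, PySem.Set.add tr2 b, d1.insert h as, d2.insert h bs) := by
            simp [rdpStep, hc, hl1, hl2]
          rw [hstep, ih _ _ _ _ hnd']
          constructor
          · rintro (h1 | ⟨h', hm, hc', hp, hne⟩)
            · rcases (PySem.Set.mem_add _ _ _).mp h1 with h1 | rfl
              · exact Or.inl h1
              · exact Or.inr ⟨h, List.mem_cons_self, hc, by rw [hl1]; rfl, by rw [hl2]; simp⟩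
            · have hne' : h' ≠ h := fun he => hnotin (he ▸ hm)
              rw [PySem.Dict.getD_insert] at hp hne
              rw [PySem.Dict.contains_insert] at hc'
              simp only [if_neg hne'] at hp hne
              simp [hne'] at hc'
              exact Or.inr ⟨h', List.mem_cons_of_mem _ hm, hc', hp, hne⟩
          · rintro (h1 | ⟨h', hm, hc', hp, hne⟩)
            · exact Or.inl ((PySem.Set.mem_add _ _ _).mpr (Or.inl h1))
            · rcases List.mem_cons.mp hm with rfl | hm'
              · rw [hl1] at hp; simp at hp
                exact Or.inl ((PySem.Set.mem_add _ _ _).mpr (Or.inr hp.symm))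
              · have hne' : h' ≠ h := fun he => hnotin (he ▸ hm')
                exact Or.inr ⟨h', hm',
                  by rw [PySem.Dict.contains_insert]; simp [hc'],
                  by rw [PySem.Dict.getD_insert, if_neg hne']; exact hp,
                  by rw [PySem.Dict.getD_insert, if_neg hne']; exact hne⟩
    · have hstep : rdpStep (tr1, tr2, d1, d2) h = (tr1, tr2, d1, d2) := by
        simp [rdpStep, hc]
      rw [hstep, ih _ _ _ _ hnd']
      constructor
      · rintro (h1 | ⟨h', hm, hp⟩)
        · exact Or.inl h1
        · exact Or.inr ⟨h', List.mem_cons_of_mem _ hm, hp⟩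
      · rintro (h1 | ⟨h', hm, hc', hp, hne⟩)
        · exact Or.inl h1
        · rcases List.mem_cons.mp hm with rfl | hm'
          · exact absurd hc' hc
          · exact Or.inr ⟨h', hm', hc', hp, hne⟩


theorem rdpLoop_mem2 (ks : List String) (tr1 tr2 : PySem.Set Int)
    (d1 d2 : PySem.Dict String (List Int)) (hnd : ks.Nodup) (i : Int) :
    i ∈ (ks.foldl rdpStep (tr1, tr2, d1, d2)).2.1 ↔
      i ∈ tr2 ∨ ∃ h ∈ ks, d2.contains h = true ∧ (d2.getD h []).head? = some i ∧ d1.getD h [] ≠ [] := by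
  induction ks generalizing tr1 tr2 d1 d2 with
  | nil => simp
  | cons h ks ih =>
    have hnotin : h ∉ ks := (List.nodup_cons.mp hnd).1
    have hnd' : ks.Nodup := (List.nodup_cons.mp hnd).2
    rw [List.foldl_cons]
    by_cases hc : d2.contains h = true
    · rcases hl1 : d1.getD h [] with _ | ⟨a, as⟩
      · have hstep : rdpStep (tr1, tr2, d1, d2) h = (tr1, tr2, d1, d2) := by
          simp [rdpStep, hc, hl1]
        rw [hstep, ih _ _ _ _ hnd']
        constructor
        · rintro (h1 | ⟨h', hm, hp⟩)
          · exact Or.inl h1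
          · exact Or.inr ⟨h', List.mem_cons_of_mem _ hm, hp⟩
        · rintro (h1 | ⟨h', hm, hc', hp, hne⟩)
          · exact Or.inl h1
          · rcases List.mem_cons.mp hm with rfl | hm'
            · rw [hl1] at hne; simp at hne
            · exact Or.inr ⟨h', hm', hc', hp, hne⟩
      · rcases hl2 : d2.getD h [] with _ | ⟨b, bs⟩
        · have hstep : rdpStep (tr1, tr2, d1, d2) h = (tr1, tr2, d1, d2) := by
            simp [rdpStep, hc, hl1, hl2]
          rw [hstep, ih _ _ _ _ hnd']
          constructor
          · rintro (h1 | ⟨h', hm, hp⟩)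
            · exact Or.inl h1
            · exact Or.inr ⟨h', List.mem_cons_of_mem _ hm, hp⟩
          · rintro (h1 | ⟨h', hm, hc', hp, hne⟩)
            · exact Or.inl h1
            · rcases List.mem_cons.mp hm with rfl | hm'
              · rw [hl2] at hp; simp at hp
              · exact Or.inr ⟨h', hm', hc', hp, hne⟩
        · have hstep : rdpStep (tr1, tr2, d1, d2) h =
              (PySem.Set.add tr1 a, PySem.Set.add tr2 b, d1.insert h as, d2.insert h bs) := by
            simp [rdpStep, hc, hl1, hl2]
          rw [hstep, ih _ _ _ _ hnd']
          constructor
          · rintro (h1 | ⟨h', hm, hc', hp, hne⟩)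
            · rcases (PySem.Set.mem_add _ _ _).mp h1 with h1 | rfl
              · exact Or.inl h1
              · exact Or.inr ⟨h, List.mem_cons_self, hc, by rw [hl2]; rfl, by rw [hl1]; simp⟩
            · have hne' : h' ≠ h := fun he => hnotin (he ▸ hm)
              rw [PySem.Dict.getD_insert] at hp hne
              rw [PySem.Dict.contains_insert] at hc'
              simp only [if_neg hne'] at hp hne
              simp [hne'] at hc'
              exact Or.inr ⟨h', List.mem_cons_of_mem _ hm, hc', hp, hne⟩
          · rintro (h1 | ⟨h', hm, hc', hp, hne⟩)
            · exact Or.inl ((PySem.Set.mem_add _ _ _).mpr (Or.inl h1))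
            · rcases List.mem_cons.mp hm with rfl | hm'
              · rw [hl2] at hp; simp at hp
                exact Or.inl ((PySem.Set.mem_add _ _ _).mpr (Or.inr hp.symm))
              · have hne' : h' ≠ h := fun he => hnotin (he ▸ hm')
                exact Or.inr ⟨h', hm',
                  by rw [PySem.Dict.contains_insert]; simp [hc'],
                  by rw [PySem.Dict.getD_insert, if_neg hne']; exact hp,
                  by rw [PySem.Dict.getD_insert, if_neg hne']; exact hne⟩
    · have hstep : rdpStep (tr1, tr2, d1, d2) h = (tr1, tr2, d1, d2) := by
        simp [rdpStep, hc]
      rw [hstep, ih _ _ _ _ hnd']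
      constructor
      · rintro (h1 | ⟨h', hm, hp⟩)
        · exact Or.inl h1
        · exact Or.inr ⟨h', List.mem_cons_of_mem _ hm, hp⟩
      · rintro (h1 | ⟨h', hm, hc', hp, hne⟩)
        · exact Or.inl h1
        · rcases List.mem_cons.mp hm with rfl | hm'
          · exact absurd hc' hc
          · exact Or.inr ⟨h', hm', hc', hp, hne⟩


-- recursive form of B's single pass
def rdpGo (p : PySem.Set String) (r : List (List String)) : List (List String) :=
  match r with
  | [] => []
  | it :: r' =>
    if rdpKey it ∈ p then rdpGo (PySem.Set.discard p (rdpKey it)) r'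
    else it :: rdpGo p r'

theorem rdpGo_cons (p : PySem.Set String) (it : List String) (r' : List (List String)) :
    rdpGo p (it :: r') = if rdpKey it ∈ p then rdpGo (PySem.Set.discard p (rdpKey it)) r'
      else it :: rdpGo p r' := rfl

theorem rdpHeadIdx_cons (it : List String) (r' : List (List String)) (n : Int) (h : String) :
    rdpHeadIdx (it :: r') n h = if rdpKey it = h then some n else rdpHeadIdx r' (n + 1) h := rfl

theorem rdpFilterShared_eq_go (r : List (List String)) (p : PySem.Set String)
    (acc : List (List String)) :
    (r.foldl
      (fun (st : PySem.Set String × List (List String)) item =>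
        let h := PySem.List.pyGetD item 3 ""
        if PySem.Set.contains st.1 h then (PySem.Set.discard st.1 h, st.2)
        else (st.1, st.2 ++ [item]))
      (p, acc)).2 = acc ++ rdpGo p r := by
  induction r generalizing p acc with
  | nil => simp [rdpGo]
  | cons it r' ih =>
    rw [List.foldl_cons]
    by_cases hm : rdpKey it ∈ p
    · have : PySem.Set.contains p (PySem.List.pyGetD it 3 "") = true :=
        (PySem.Set.contains_iff _ _).mpr hm
      simp only [this, if_pos]
      rw [ih, rdpGo_cons, if_pos hm]
      rfl
    · have : PySem.Set.contains p (PySem.List.pyGetD it 3 "") = false := by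
        rw [← Bool.not_eq_true]
        exact fun hcc => hm ((PySem.Set.contains_iff _ _).mp hcc)
      simp only [this, Bool.false_eq_true, if_neg, not_false_iff]
      rw [ih, rdpGo_cons, if_neg hm]
      simp

-- main correspondence: index-set filtering = pending-set single pass
theorem rdpFilt_eq (r : List (List String)) (n : Int) (tr : PySem.Set Int) (pending : PySem.Set String)
    (H : ∀ (j : Nat) (hj : j < r.length),
        ((n + j : Int) ∈ tr ↔ rdpKey r[j] ∈ pending ∧ rdpHeadIdx r n (rdpKey r[j]) = some (n + j))) :
    ((PySem.List.enumerate r n).filter (fun p => !(PySem.Set.contains tr p.1))).map (·.2)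
      = rdpGo pending r := by
  induction r generalizing n pending with
  | nil => simp [rdpGo, PySem.List.enumerate_nil]
  | cons it r' ih =>
    have h0 := H 0 (by simp)
    simp only [List.getElem_cons_zero, Nat.cast_zero, add_zero] at h0
    have hhead : rdpHeadIdx (it :: r') n (rdpKey it) = some n := by
      rw [rdpHeadIdx_cons, if_pos rfl]
    rw [hhead] at h0
    simp only [and_true] at h0
    rw [PySem.List.enumerate_cons]
    by_cases hm : rdpKey it ∈ pending
    · have htr : n ∈ tr := h0.mpr hm
      have hcont : PySem.Set.contains tr n = true := (PySem.Set.contains_iff _ _).mpr htr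
      rw [List.filter_cons]
      simp only [hcont, Bool.not_true, Bool.false_eq_true, if_neg, not_false_iff]
      rw [rdpGo_cons, if_pos hm]
      apply ih (n + 1) (PySem.Set.discard pending (rdpKey it))
      intro j hj
      have hH := H (j + 1) (by simpa using hj)
      simp only [List.getElem_cons_succ] at hH
      have harith : n + ((j : Nat) + 1 : Nat) = n + 1 + (j : Nat) := by push_cast; ring
      rw [harith] at hH
      by_cases hk : rdpKey r'[j] = rdpKey it
      · rw [hH]
        have h1 : rdpHeadIdx (it :: r') n (rdpKey r'[j]) = some n := by
          rw [rdpHeadIdx_cons, if_pos hk.symm]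
        rw [h1]
        constructor
        · rintro ⟨-, hsome⟩
          exfalso
          have : n = n + 1 + (j : Nat) := by exact Option.some.inj hsome
          omega
        · rintro ⟨hp, -⟩
          exact absurd ((PySem.Set.mem_discard _ _ _).mp hp).2 (by simp [hk])
      · rw [hH]
        have h1 : rdpHeadIdx (it :: r') n (rdpKey r'[j]) = rdpHeadIdx r' (n + 1) (rdpKey r'[j]) := by
          rw [rdpHeadIdx_cons, if_neg (fun he => hk he.symm)]
        rw [h1]
        constructor
        · rintro ⟨hp, hs⟩
          exact ⟨(PySem.Set.mem_discard _ _ _).mpr ⟨hp, hk⟩, hs⟩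
        · rintro ⟨hp, hs⟩
          exact ⟨((PySem.Set.mem_discard _ _ _).mp hp).1, hs⟩
    · have htr : n ∉ tr := fun hn => hm (h0.mp hn)
      have hcont : PySem.Set.contains tr n = false := by
        rw [← Bool.not_eq_true]
        exact fun hcc => htr ((PySem.Set.contains_iff _ _).mp hcc)
      rw [List.filter_cons]
      simp only [hcont, Bool.not_false, if_pos]
      rw [rdpGo_cons, if_neg hm, List.map_cons]
      congr 1
      apply ih (n + 1) pending
      intro j hj
      have hH := H (j + 1) (by simpa using hj)
      simp only [List.getElem_cons_succ] at hH
      have harith : n + ((j : Nat) + 1 : Nat) = n + 1 + (j : Nat) := by push_cast; ring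
      rw [harith] at hH
      by_cases hk : rdpKey r'[j] = rdpKey it
      · rw [hH]
        have h1 : rdpHeadIdx (it :: r') n (rdpKey r'[j]) = some n := by
          rw [rdpHeadIdx_cons, if_pos hk.symm]
        rw [h1]
        constructor
        · rintro ⟨-, hsome⟩
          exfalso
          have : n = n + 1 + (j : Nat) := by exact Option.some.inj hsome
          omega
        · rintro ⟨hp, -⟩
          exact absurd (hk ▸ hp) hm
      · rw [hH]
        have h1 : rdpHeadIdx (it :: r') n (rdpKey r'[j]) = rdpHeadIdx r' (n + 1) (rdpKey r'[j]) := by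
          rw [rdpHeadIdx_cons, if_neg (fun he => hk he.symm)]
        rw [h1]


theorem rdpComp_eq (r : List (List String)) (tr : PySem.Set Int) (pending : PySem.Set String)
    (hch : ∀ i : Int, i ∈ tr ↔ ∃ h, h ∈ pending ∧ rdpHeadIdx r 0 h = some i) :
    ((PySem.List.enumerate r 0).filter (fun p => !(PySem.Set.contains tr p.1))).map (·.2)
      = rdpGo pending r := by
  apply rdpFilt_eq
  intro j hj
  rw [hch]
  constructor
  · rintro ⟨h, hp, hs⟩
    obtain ⟨j', hj', hi, hk⟩ := rdpHeadIdx_eq_some r 0 h _ hs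
    have hjj : j' = j := by omega
    subst hjj
    exact ⟨hk ▸ hp, hk ▸ hs⟩
  · rintro ⟨hp, hs⟩
    exact ⟨rdpKey r[j], hp, hs⟩

-- the state after A's loop, and B's shared set
def rdpSt (r1 r2 : List (List String)) :
    PySem.Set Int × PySem.Set Int × PySem.Dict String (List Int) × PySem.Dict String (List Int) :=
  (rdpBuild r1).keys.foldl rdpStep (PySem.Set.empty, PySem.Set.empty, rdpBuild r1, rdpBuild r2)

def rdpShared (r1 r2 : List (List String)) : PySem.Set String :=
  PySem.Set.inter (PySem.Set.ofList (r1.map rdpKey)) (PySem.Set.ofList (r2.map rdpKey))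

theorem rdpBuild_getD_head (r : List (List String)) (h : String) :
    ((rdpBuild r).getD h []).head? = rdpHeadIdx r 0 h := by
  rw [rdpBuild_getD, rdpHeadIdx_filter]

theorem rdpBuild_getD_ne_nil (r : List (List String)) (h : String) :
    (rdpBuild r).getD h [] ≠ [] ↔ h ∈ r.map rdpKey := by
  rw [← rdpHeadIdx_isSome r 0 h, ← rdpBuild_getD_head, Option.isSome_iff_ne_none]
  simp [List.head?_eq_none_iff]

theorem rdpBuild_contains (r : List (List String)) (h : String) :
    (rdpBuild r).contains h = true ↔ h ∈ r.map rdpKey := by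
  rw [PySem.Dict.contains_iff_mem_keys, rdpBuild_keys_mem]

theorem rdpShared_mem (r1 r2 : List (List String)) (h : String) :
    h ∈ rdpShared r1 r2 ↔ h ∈ r1.map rdpKey ∧ h ∈ r2.map rdpKey := by
  rw [rdpShared, PySem.Set.mem_inter, PySem.Set.mem_ofList, PySem.Set.mem_ofList]

theorem rdpChar1 (r1 r2 : List (List String)) (i : Int) :
    i ∈ (rdpSt r1 r2).1 ↔ ∃ h, h ∈ rdpShared r1 r2 ∧ rdpHeadIdx r1 0 h = some i := by
  rw [rdpSt, rdpLoop_mem1 _ _ _ _ _ (rdpBuild_keys_nodup r1)]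
  simp only [PySem.Set.empty, List.not_mem_nil, false_or]
  constructor
  · rintro ⟨h, hm, hc, hp, hne⟩
    refine ⟨h, (rdpShared_mem r1 r2 h).mpr ⟨(rdpBuild_keys_mem r1 h).mp hm, (rdpBuild_contains r2 h).mp hc⟩, ?_⟩
    rw [← rdpBuild_getD_head, hp]
  · rintro ⟨h, hsh, hs⟩
    obtain ⟨h1, h2⟩ := (rdpShared_mem r1 r2 h).mp hsh
    exact ⟨h, (rdpBuild_keys_mem r1 h).mpr h1, (rdpBuild_contains r2 h).mpr h2,
      by rw [rdpBuild_getD_head, hs], (rdpBuild_getD_ne_nil r2 h).mpr h2⟩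

theorem rdpChar2 (r1 r2 : List (List String)) (i : Int) :
    i ∈ (rdpSt r1 r2).2.1 ↔ ∃ h, h ∈ rdpShared r1 r2 ∧ rdpHeadIdx r2 0 h = some i := by
  rw [rdpSt, rdpLoop_mem2 _ _ _ _ _ (rdpBuild_keys_nodup r1)]
  simp only [PySem.Set.empty, List.not_mem_nil, false_or]
  constructor
  · rintro ⟨h, hm, hc, hp, hne⟩
    refine ⟨h, (rdpShared_mem r1 r2 h).mpr ⟨(rdpBuild_keys_mem r1 h).mp hm, (rdpBuild_contains r2 h).mp hc⟩, ?_⟩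
    rw [← rdpBuild_getD_head, hp]
  · rintro ⟨h, hsh, hs⟩
    obtain ⟨h1, h2⟩ := (rdpShared_mem r1 r2 h).mp hsh
    exact ⟨h, (rdpBuild_keys_mem r1 h).mpr h1, (rdpBuild_contains r2 h).mpr h2,
      by rw [rdpBuild_getD_head, hs], (rdpBuild_getD_ne_nil r1 h).mpr h1⟩

theorem rdpFilterShared_go (p : PySem.Set String) (r : List (List String)) :
    rdpFilterShared p r = rdpGo p r := by
  rw [rdpFilterShared, rdpFilterShared_eq_go, List.nil_append]

theorem rdpA_eq (r1 r2 : List (List String)) :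
    remove_duplicate_pairs r1 r2 =
      (((PySem.List.enumerate r1 0).filter (fun p => !(PySem.Set.contains (rdpSt r1 r2).1 p.1))).map (·.2),
       ((PySem.List.enumerate r2 0).filter (fun p => !(PySem.Set.contains (rdpSt r1 r2).2.1 p.1))).map (·.2)) := rfl

theorem rdpB_eq (r1 r2 : List (List String)) :
    remove_duplicate_pairs_alt r1 r2 =
      (rdpGo (rdpShared r1 r2) r1, rdpGo (rdpShared r1 r2) r2) := by
  show (rdpFilterShared (rdpShared r1 r2) r1, rdpFilterShared (rdpShared r1 r2) r2) = _
  rw [rdpFilterShared_go, rdpFilterShared_go]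

-- ===== VERDICT (by name: the statement is the Claim_ definition above) =====
theorem remove_duplicate_pairs_spec : Claim_equal_remove_duplicate_pairs := by
  intro r1 r2 _ _
  unfold Spec_remove_duplicate_pairs
  rw [rdpA_eq, rdpB_eq]
  exact Prod.ext
    (rdpComp_eq r1 (rdpSt r1 r2).1 (rdpShared r1 r2) (rdpChar1 r1 r2))
    (rdpComp_eq r2 (rdpSt r1 r2).2.1 (rdpShared r1 r2) (rdpChar2 r1 r2))
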